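-- pv_equiv track=rewrite | github.com/brydon/brydon.github.io | math1mp/sols-tut5.py | all_even
-- ===== SOURCE A (Python) =====
-- def all_even(minimum, maximum):
--     """Returns a list of integers between min and max (inclusive) whose digits (base 10) are all even"""
--     values = []
--     for i in range(minimum, maximum+1):
--         s = str(i)
--         alleven = True
--
--         for digit in s:
--             if int(digit) % 2 != 0:
--                 alleven = False
--                 break
--
--         if alleven:
--             values.append(s)
--
--     return values
-- ===== SOURCE B (Python) =====
-- def all_even(minimum, maximum):
--     """Returns a list of integers between min and max (inclusive) whose digits (base 10) are all even"""
--     lo = max(minimum, 0)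
--     values = ["0"] if lo <= 0 <= maximum else []
--     level = [2, 4, 6, 8]
--     while level and level[0] <= maximum:
--         values += [str(n) for n in level if lo <= n <= maximum]
--         level = [10 * n + d for n in level if 10 * n <= maximum for d in (0, 2, 4, 6, 8)]
--     return values
-- ===== Notes on version B (the rewrite author's own statement) =====
-- stated objective: faster
-- what changed: Instead of scanning every integer in [minimum, maximum] and testing each digit, B directly constructs the all-even-digit numbers level by level (seeds 2,4,6,8, each level appending an even digit), emitting those inside the range.
-- crash fix: A raises ValueError (int('-')) whenever the range [minimum, maximum] contains a negative integer; B instead returns the even-digit numbers of the nonnegative part [0, maximum]. — e.g. on all_even(-3, 5): A raises ValueError, B returns ["0", "2", "4"]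
import Mathlib
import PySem

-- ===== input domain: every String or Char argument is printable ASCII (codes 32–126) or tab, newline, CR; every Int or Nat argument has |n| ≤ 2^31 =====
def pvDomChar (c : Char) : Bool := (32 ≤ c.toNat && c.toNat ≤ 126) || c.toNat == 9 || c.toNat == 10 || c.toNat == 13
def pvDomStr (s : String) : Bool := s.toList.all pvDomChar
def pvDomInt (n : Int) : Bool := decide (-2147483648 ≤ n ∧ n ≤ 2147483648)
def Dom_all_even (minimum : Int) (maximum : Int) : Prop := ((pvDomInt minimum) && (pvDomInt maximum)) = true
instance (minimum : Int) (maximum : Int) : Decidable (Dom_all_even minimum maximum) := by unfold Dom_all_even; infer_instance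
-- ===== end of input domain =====

-- B replaces A's scan of every integer in [minimum, maximum] by direct level-by-level
-- construction of the numbers whose digits are all even (objective: faster).


-- ===== PORT A =====
-- inner 'for digit in s' loop with its break; int(digit) is PySem.Int.ofStr? — it is none
-- (Python: ValueError, on the '-' of a negative number) only outside Pre_all_even
def pvAllEvenChars : List Char → Bool
  | [] => true
  | c :: rest =>
    if PySem.Int.mod ((PySem.Int.ofStr? (String.ofList [c])).getD 1) 2 ≠ 0 then false
    else pvAllEvenChars rest

def all_even (minimum : Int) (maximum : Int) : List String :=
  (PySem.List.pyRange minimum (maximum + 1) 1).foldl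
    (fun values i =>
      let s := PySem.Int.toStr i
      if pvAllEvenChars s.toList then values ++ [s] else values) []

-- ===== PORT B =====
def pvChildren (n : Int) : List Int := [10 * n, 10 * n + 2, 10 * n + 4, 10 * n + 6, 10 * n + 8]

def pvExpand (maxi : Int) (level : List Int) : List Int :=
  (level.filter (fun n => decide (10 * n ≤ maxi))).flatMap pvChildren

-- B's while loop; fuel is a totality guard only (level heads grow tenfold, so with
-- fuel = maximum.natAbs + 1 the guard 'level[0] <= maximum' fails before fuel runs out)
def pvLoop (lo : Int) (maxi : Int) (fuel : Nat) (level : List Int) : List String :=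
  match fuel, level with
  | _, [] => []
  | 0, _ :: _ => []
  | fuel + 1, h :: t =>
    if h ≤ maxi then
      ((h :: t).filter (fun n => decide (lo ≤ n) && decide (n ≤ maxi))).map PySem.Int.toStr
        ++ pvLoop lo maxi fuel (pvExpand maxi (h :: t))
    else []

def all_even_alt (minimum : Int) (maximum : Int) : List String :=
  let lo := max minimum 0
  (if lo ≤ 0 ∧ 0 ≤ maximum then ["0"] else [])
    ++ pvLoop lo maximum (maximum.natAbs + 1) [2, 4, 6, 8]

-- ===== PRECONDITION & SPEC =====
-- A raises ValueError (int('-')) as soon as the range contains a negative integer;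
-- Pre_ admits exactly the inputs where every scanned integer is nonnegative (or the range is empty).
def Pre_all_even (minimum : Int) (maximum : Int) : Prop := 0 ≤ minimum ∨ maximum < minimum
instance (minimum : Int) (maximum : Int) : Decidable (Pre_all_even minimum maximum) := by
  unfold Pre_all_even; infer_instance

def pvWitness_all_even : Int × Int := (0, 30)

-- A raises ValueError on every range that contains a negative integer; B instead returns the
-- even-digit numbers of the nonnegative part [0, maximum].
def Raises_all_even (minimum : Int) (maximum : Int) : Prop := minimum < 0 ∧ minimum ≤ maximum
instance (minimum : Int) (maximum : Int) : Decidable (Raises_all_even minimum maximum) := by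
  unfold Raises_all_even; infer_instance
def pvRaiseWitness_all_even : Int × Int := (-3, 5)
def pvRaiseWitnessOut_all_even : List String := ["0", "2", "4"]

def Spec_all_even (minimum : Int) (maximum : Int) (out : List String) : Prop := out = all_even_alt minimum maximum
instance (minimum : Int) (maximum : Int) (out : List String) : Decidable (Spec_all_even minimum maximum out) := by unfold Spec_all_even; infer_instance

-- ===== CLAIM (what is proved, stated in full; the proofs are below) =====
def Claim_equal_all_even : Prop := ∀ (minimum : Int) (maximum : Int), Dom_all_even minimum maximum → Pre_all_even minimum maximum → Spec_all_even minimum maximum (all_even minimum maximum)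

def Claim_raises_all_even : Prop := (∀ (minimum : Int) (maximum : Int), Dom_all_even minimum maximum → Raises_all_even minimum maximum → ¬ Pre_all_even minimum maximum) ∧ (Dom_all_even (pvRaiseWitness_all_even.1) (pvRaiseWitness_all_even.2) ∧ Raises_all_even (pvRaiseWitness_all_even.1) (pvRaiseWitness_all_even.2) ∧ all_even_alt (pvRaiseWitness_all_even.1) (pvRaiseWitness_all_even.2) = pvRaiseWitnessOut_all_even)

-- ===== LEMMAS AND PROOFS =====

-- digits of a nonnegative number, most significant first (proof-side mirror of Nat.toDigits)
def pvDigs (n : Nat) : List Char :=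
  if _h : n < 10 then [Nat.digitChar n]
  else pvDigs (n / 10) ++ [Nat.digitChar (n % 10)]
  decreasing_by exact Nat.div_lt_self (by omega) (by omega)

-- 'all digits even', arithmetically
def pvEvenN (n : Nat) : Bool :=
  if h : n < 10 then n % 2 == 0
  else (n % 2 == 0) && pvEvenN (n / 10)
  decreasing_by exact Nat.div_lt_self (by omega) (by omega)

-- the filter predicate of the proofs
def pvQ (n : Int) : Bool := pvEvenN n.toNat

theorem pvAllEvenChars_append (xs : List Char) (c : Char) :
    pvAllEvenChars (xs ++ [c]) = (pvAllEvenChars xs && pvAllEvenChars [c]) := by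
  induction xs with
  | nil => simp [pvAllEvenChars]
  | cons x xs ih =>
    simp only [List.cons_append, pvAllEvenChars]
    split <;> simp [ih, pvAllEvenChars]

theorem pvToDigitsCore_eq (n : Nat) : ∀ (f : Nat) (l : List Char), n < f →
    Nat.toDigitsCore 10 f n l = pvDigs n ++ l := by
  induction n using Nat.strong_induction_on with
  | _ n ih =>
    intro f l hf
    match f with
    | f + 1 =>
      rw [Nat.toDigitsCore]
      by_cases h10 : n < 10
      · rw [if_pos (by omega)]
        rw [pvDigs, dif_pos h10]
        have : n % 10 = n := Nat.mod_eq_of_lt h10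
        simp [this]
      · rw [if_neg (by omega)]
        conv_rhs => rw [pvDigs]
        rw [dif_neg h10]
        rw [ih (n / 10) (Nat.div_lt_self (by omega) (by omega)) f _ (by omega)]
        simp

theorem pvToChars_nonneg (n : Int) (h : 0 ≤ n) :
    PySem.Int.toChars n = pvDigs n.toNat := by
  rw [PySem.Int.toChars, if_neg (by omega)]
  rw [Nat.toDigits, pvToDigitsCore_eq _ _ _ (by omega)]
  simp

theorem pvAllEvenChars_digitChar (d : Nat) (h : d < 10) :
    pvAllEvenChars [Nat.digitChar d] = (d % 2 == 0) := by
  interval_cases d <;> decide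

theorem pvAllEvenChars_digs (n : Nat) : pvAllEvenChars (pvDigs n) = pvEvenN n := by
  induction n using Nat.strong_induction_on with
  | _ n ih =>
    by_cases h10 : n < 10
    · rw [pvDigs, dif_pos h10, pvEvenN, dif_pos h10, pvAllEvenChars_digitChar n h10]
    · rw [pvDigs, dif_neg h10, pvEvenN, dif_neg h10]
      rw [pvAllEvenChars_append, ih (n / 10) (Nat.div_lt_self (by omega) (by omega))]
      rw [pvAllEvenChars_digitChar (n % 10) (by omega)]
      have : n % 10 % 2 = n % 2 := by omega
      rw [this, Bool.and_comm]

-- A's inner loop, on a nonnegative integer, is the arithmetic all-digits-even test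
theorem pvAPred_eq (n : Int) (h : 0 ≤ n) :
    pvAllEvenChars (PySem.Int.toChars n) = pvQ n := by
  rw [pvToChars_nonneg n h, pvAllEvenChars_digs]; rfl

-- A as filter-then-map
theorem pvA_eq (minimum maximum : Int) :
    all_even minimum maximum =
      ((PySem.List.pyRange minimum (maximum + 1) 1).filter
        (fun i => pvAllEvenChars (PySem.Int.toChars i))).map PySem.Int.toStr := by
  rw [all_even]
  simp only [PySem.Int.toList_toStr]
  rw [PySem.List.foldl_append_if (fun i => pvAllEvenChars (PySem.Int.toChars i)) PySem.Int.toStr]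
  simp

-- no number in [10^k, 2*10^k) has all digits even (its leading digit is 1)
theorem pvNotEvenLow (k : Nat) : ∀ m : Nat, 10 ^ k ≤ m → m < 2 * 10 ^ k → pvEvenN m = false := by
  induction k with
  | zero =>
    intro m h1 h2
    have : m = 1 := by omega
    subst this; simp [pvEvenN]
  | succ k ih =>
    intro m h1 h2
    have hpow : 0 < 10 ^ k := Nat.pow_pos (by omega)
    have h10 : ¬ m < 10 := by
      have : (10:Nat) ≤ 10 ^ (k + 1) := by
        calc (10:Nat) = 10 ^ 1 := by norm_num
        _ ≤ 10 ^ (k+1) := Nat.pow_le_pow_right (by omega) (by omega)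
      omega
    rw [pvEvenN, dif_neg h10]
    have e1 : 10 ^ k ≤ m / 10 := by
      rw [Nat.le_div_iff_mul_le (by omega)]
      calc 10 ^ k * 10 = 10 ^ (k+1) := by ring
      _ ≤ m := h1
    have e2 : m / 10 < 2 * 10 ^ k := by
      rw [Nat.div_lt_iff_lt_mul (by omega)]
      calc m < 2 * 10 ^ (k+1) := h2
      _ = 2 * 10 ^ k * 10 := by ring
    rw [ih (m / 10) e1 e2, Bool.and_false]

-- the k-th level of B's loop
def pvLevel (maxi : Int) : Nat → List Int
  | 0 => [2, 4, 6, 8]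
  | k + 1 => pvExpand maxi (pvLevel maxi k)

-- the level predicate: all digits even, and (past the seeds) the parent was not pruned
def pvP (maxi n : Int) : Bool := pvQ n && (decide (n < 10) || decide (10 * (n / 10) ≤ maxi))

theorem pvPow_le (k : Nat) : (10:Int) ^ k ≤ 10 ^ (k + 1) := by
  have h : (1:Int) ≤ 10 ^ k := one_le_pow₀ (by norm_num)
  calc (10:Int) ^ k = 10 ^ k * 1 := by ring
  _ ≤ 10 ^ k * 10 := by nlinarith
  _ = 10 ^ (k + 1) := by ring

theorem pvLevel_head (maxi : Int) (k : Nat) (hk : 2 * 10 ^ k ≤ maxi) :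
    ∃ t, pvLevel maxi k = (2 * 10 ^ k : Int) :: t := by
  induction k with
  | zero => exact ⟨[4, 6, 8], by norm_num [pvLevel]⟩
  | succ k ih =>
    have hk' : 2 * (10:Int) ^ k ≤ maxi := le_trans (by nlinarith [pvPow_le k]) hk
    obtain ⟨t, ht⟩ := ih hk'
    refine ⟨(10 * (2 * 10 ^ k) + 2) :: (10 * (2 * 10 ^ k) + 4) :: (10 * (2 * 10 ^ k) + 6) ::
      (10 * (2 * 10 ^ k) + 8) :: pvExpand maxi t, ?_⟩
    rw [pvLevel, ht]
    rw [pvExpand, List.filter_cons,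
      if_pos (by
        have he : (10:Int) * (2 * 10 ^ k) = 2 * 10 ^ (k + 1) := by ring
        simp only [decide_eq_true_eq]
        omega)]
    simp [pvExpand, pvChildren, List.flatMap_cons]
    ring

theorem pvQ_ten (a j : Int) (ha : 1 ≤ a) (hj : 0 ≤ j) (hj2 : j < 10) :
    pvQ (10 * a + j) = ((j.toNat % 2 == 0) && pvQ a) := by
  unfold pvQ
  have h1 : (10 * a + j).toNat = 10 * a.toNat + j.toNat := by omega
  rw [h1]
  have h2 : ¬ 10 * a.toNat + j.toNat < 10 := by omega
  rw [pvEvenN, dif_neg h2]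
  have h3 : (10 * a.toNat + j.toNat) % 2 = j.toNat % 2 := by omega
  have h4 : (10 * a.toNat + j.toNat) / 10 = a.toNat := by omega
  rw [h3, h4]

theorem pvRange_ten (a : Int) : PySem.List.pyRange (10 * a) (10 * a + 10) 1 =
    [10 * a, 10 * a + 1, 10 * a + 2, 10 * a + 3, 10 * a + 4, 10 * a + 5, 10 * a + 6,
     10 * a + 7, 10 * a + 8, 10 * a + 9] := by
  rw [PySem.List.pyRange_one]
  rw [show ((10 * a + 10 - 10 * a : Int)).toNat = 10 from by omega]
  rw [show (List.range 10) = [0,1,2,3,4,5,6,7,8,9] from rfl]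
  simp

theorem pvExpand_filter (maxi b : Int) : ∀ (d : Nat) (a : Int), 1 ≤ a → d = (b - a).toNat →
    ((PySem.List.pyRange a b 1).filter (fun n => pvQ n && decide (10 * n ≤ maxi))).flatMap pvChildren
      = (PySem.List.pyRange (10 * a) (10 * b) 1).filter (pvP maxi) := by
  intro d
  induction d with
  | zero =>
    intro a ha hd
    rw [PySem.List.pyRange_one_eq_nil (by omega : b ≤ a),
        PySem.List.pyRange_one_eq_nil (by omega : 10 * b ≤ 10 * a)]
    simp
  | succ d ih =>
    intro a ha hd
    have hab : a < b := by omega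
    have e0 : pvQ (10 * a) = pvQ a := by
      have := pvQ_ten a 0 ha (by norm_num) (by norm_num); simpa using this
    have e1 : pvQ (10 * a + 1) = false := by
      have := pvQ_ten a 1 ha (by norm_num) (by norm_num); simpa using this
    have e2 : pvQ (10 * a + 2) = pvQ a := by
      have := pvQ_ten a 2 ha (by norm_num) (by norm_num); simpa using this
    have e3 : pvQ (10 * a + 3) = false := by
      have := pvQ_ten a 3 ha (by norm_num) (by norm_num); simpa using this
    have e4 : pvQ (10 * a + 4) = pvQ a := by
      have := pvQ_ten a 4 ha (by norm_num) (by norm_num); simpa using this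
    have e5 : pvQ (10 * a + 5) = false := by
      have := pvQ_ten a 5 ha (by norm_num) (by norm_num); simpa using this
    have e6 : pvQ (10 * a + 6) = pvQ a := by
      have := pvQ_ten a 6 ha (by norm_num) (by norm_num); simpa using this
    have e7 : pvQ (10 * a + 7) = false := by
      have := pvQ_ten a 7 ha (by norm_num) (by norm_num); simpa using this
    have e8 : pvQ (10 * a + 8) = pvQ a := by
      have := pvQ_ten a 8 ha (by norm_num) (by norm_num); simpa using this
    have e9 : pvQ (10 * a + 9) = false := by
      have := pvQ_ten a 9 ha (by norm_num) (by norm_num); simpa using this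
    have ep : ∀ j : Int, 0 ≤ j → j < 10 →
        pvP maxi (10 * a + j) = (pvQ (10 * a + j) && decide (10 * a ≤ maxi)) := by
      intro j hj hj2
      rw [pvP]
      rw [show (10 * a + j) / 10 = a from by omega]
      rw [decide_eq_false (by omega : ¬ (10 * a + j < 10))]
      simp
    have ep0 : pvP maxi (10 * a) = (pvQ (10 * a) && decide (10 * a ≤ maxi)) := by
      have := ep 0 (by norm_num) (by norm_num); simpa using this
    rw [PySem.List.pyRange_one_cons hab]
    rw [PySem.List.pyRange_one_append (10 * a) (10 * a + 10) (10 * b)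
      (by omega) (by omega)]
    rw [List.filter_append, pvRange_ten a]
    rw [show (10 : Int) * a + 10 = 10 * (a + 1) from by ring]
    rw [← ih (a + 1) (by omega) (by omega)]
    simp only [List.filter_cons, ep0, ep 1 (by norm_num) (by norm_num),
      ep 2 (by norm_num) (by norm_num), ep 3 (by norm_num) (by norm_num),
      ep 4 (by norm_num) (by norm_num), ep 5 (by norm_num) (by norm_num),
      ep 6 (by norm_num) (by norm_num), ep 7 (by norm_num) (by norm_num),
      ep 8 (by norm_num) (by norm_num), ep 9 (by norm_num) (by norm_num)]
    simp only [e0, e1, e2, e3, e4, e5, e6, e7, e8, e9]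
    cases hq : pvQ a <;> cases hp : decide (10 * a ≤ maxi) <;> simp [pvChildren]

theorem pvLevel_eq (maxi : Int) (k : Nat) :
    pvLevel maxi k = (PySem.List.pyRange ((10:Int) ^ k) ((10:Int) ^ (k + 1)) 1).filter (pvP maxi) := by
  induction k with
  | zero =>
    rw [show ((10:Int) ^ 0) = 1 from by norm_num, show ((10:Int) ^ 1) = 10 from by norm_num]
    rw [show PySem.List.pyRange 1 10 1 = [1,2,3,4,5,6,7,8,9] from by decide]
    have hs : ∀ n : Int, 0 ≤ n → n < 10 → pvP maxi n = (n.toNat % 2 == 0) := by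
      intro n h0 h10
      rw [pvP, pvQ, pvEvenN, dif_pos (by omega), decide_eq_true h10]
      simp
    rw [show ([1,2,3,4,5,6,7,8,9] : List Int).filter (pvP maxi)
          = [1,2,3,4,5,6,7,8,9].filter (fun n => (n.toNat % 2 == 0)) from by
      apply List.filter_congr
      intro x hx
      fin_cases hx <;> rw [hs _ (by norm_num) (by norm_num)]]
    rw [pvLevel]
    decide
  | succ k ih =>
    have h1 : (1:Int) ≤ 10 ^ k := one_le_pow₀ (by norm_num)
    rw [pvLevel, ih, pvExpand, List.filter_filter]
    have hmerge : (PySem.List.pyRange ((10:Int) ^ k) ((10:Int) ^ (k+1)) 1).filter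
          (fun n => decide (10 * n ≤ maxi) && pvP maxi n)
        = (PySem.List.pyRange ((10:Int) ^ k) ((10:Int) ^ (k+1)) 1).filter
          (fun n => pvQ n && decide (10 * n ≤ maxi)) := by
      apply List.filter_congr
      intro x hx
      rw [PySem.List.mem_pyRange_one] at hx
      rw [pvP]
      by_cases hxm : 10 * x ≤ maxi
      · simp [hxm, show 10 * (x / 10) ≤ maxi from by omega]
      · simp [hxm]
    rw [hmerge]
    rw [pvExpand_filter maxi ((10:Int) ^ (k+1)) ((10:Int) ^ (k+1) - (10:Int)^k).toNat ((10:Int)^k) h1 rfl]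
    rw [show (10:Int) * 10 ^ k = 10 ^ (k+1) from by ring,
        show (10:Int) * 10 ^ (k+1) = 10 ^ (k+2) from by ring]

theorem pvLevel_lb (maxi : Int) (k : Nat) (x : Int) (hx : x ∈ pvLevel maxi k) :
    2 * (10:Int) ^ k ≤ x := by
  rw [pvLevel_eq maxi k, List.mem_filter] at hx
  obtain ⟨hmem, hp⟩ := hx
  rw [PySem.List.mem_pyRange_one] at hmem
  by_contra hlt
  have hq : pvQ x = true := by
    rw [pvP] at hp; exact (Bool.and_eq_true_iff.mp hp).1
  have hc : ((10:Nat) ^ k : Int) = (10:Int) ^ k := by push_cast; ring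
  have : pvEvenN x.toNat = false := pvNotEvenLow k x.toNat (by omega) (by omega)
  rw [pvQ] at hq
  rw [this] at hq
  exact Bool.false_ne_true hq

-- clip an upper bound out of the filter
theorem pvClipHi (p : Int → Bool) (c : Int) : ∀ (d : Nat) (a b : Int), d = (b - a).toNat →
    (PySem.List.pyRange a (min b c) 1).filter p
      = (PySem.List.pyRange a b 1).filter (fun n => decide (n < c) && p n) := by
  intro d
  induction d with
  | zero =>
    intro a b hd
    rw [PySem.List.pyRange_one_eq_nil (by omega : b ≤ a),
        PySem.List.pyRange_one_eq_nil (by omega : min b c ≤ a)]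
    simp
  | succ d ih =>
    intro a b hd
    have hab : a < b := by omega
    rw [PySem.List.pyRange_one_cons hab]
    by_cases hac : a < c
    · rw [PySem.List.pyRange_one_cons (by omega : a < min b c)]
      simp only [List.filter_cons]
      rw [ih (a + 1) b (by omega)]
      simp [hac]
    · rw [PySem.List.pyRange_one_eq_nil (by omega : min b c ≤ a)]
      simp only [List.filter_nil, List.filter_cons]
      rw [← ih (a + 1) b (by omega)]
      rw [PySem.List.pyRange_one_eq_nil (by omega : min b c ≤ a + 1)]
      simp [show ¬ a < c from hac]

-- clip a lower bound out of the filter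
theorem pvClipLo (p : Int → Bool) (c : Int) (b : Int) : ∀ (d : Nat) (a : Int), d = (b - a).toNat →
    (PySem.List.pyRange (max a c) b 1).filter p
      = (PySem.List.pyRange a b 1).filter (fun n => decide (c ≤ n) && p n) := by
  intro d
  induction d with
  | zero =>
    intro a hd
    rw [PySem.List.pyRange_one_eq_nil (by omega : b ≤ a),
        PySem.List.pyRange_one_eq_nil (by omega : b ≤ max a c)]
    simp
  | succ d ih =>
    intro a hd
    have hab : a < b := by omega
    rw [PySem.List.pyRange_one_cons hab]
    by_cases hca : c ≤ a
    · rw [show max a c = a from by omega, PySem.List.pyRange_one_cons hab]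
      simp only [List.filter_cons]
      have h2 := ih (a + 1) (by omega)
      rw [show max (a+1) c = a + 1 from by omega] at h2
      rw [h2]
      simp [hca]
    · rw [show max a c = max (a+1) c from by omega]
      rw [ih (a + 1) (by omega)]
      simp [show ¬ c ≤ a from hca]

-- the main loop invariant: from level k on, B's loop emits exactly the all-even-digit
-- numbers n with 10^k ≤ n ≤ maxi and lo ≤ n, in increasing order
theorem pvLoop_eq (lo maxi : Int) : ∀ (fuel k : Nat), maxi < 10 ^ (k + fuel) →
    pvLoop lo maxi fuel (pvLevel maxi k)
      = ((PySem.List.pyRange ((10:Int) ^ k) (maxi + 1) 1).filter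
          (fun n => decide (lo ≤ n) && pvQ n)).map PySem.Int.toStr := by
  intro fuel
  induction fuel with
  | zero =>
    intro k h
    simp only [Nat.add_zero] at h
    rw [PySem.List.pyRange_one_eq_nil (by omega : maxi + 1 ≤ (10:Int) ^ k)]
    cases pvLevel maxi k <;> simp [pvLoop]
  | succ fuel ih =>
    intro k h
    have hpowk : (1:Int) ≤ 10 ^ k := one_le_pow₀ (by norm_num)
    have hpow2 : (10:Int) ^ k ≤ 10 ^ (k + 1) := pvPow_le k
    by_cases hg : 2 * (10:Int) ^ k ≤ maxi
    · -- the guard holds: one more level is emitted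
      obtain ⟨t, ht⟩ := pvLevel_head maxi k hg
      rw [ht]
      simp only [pvLoop]
      rw [if_pos hg, ← ht]
      have hexp : pvExpand maxi (pvLevel maxi k) = pvLevel maxi (k + 1) := by rw [pvLevel]
      rw [hexp]
      have h' : maxi < (10:Int) ^ ((k + 1) + fuel) := by
        have : k + (fuel + 1) = (k + 1) + fuel := by omega
        rw [← this]; exact h
      rw [ih (k + 1) h']
      rw [pvLevel_eq maxi k, List.filter_filter]
      -- split the target range at min (10^(k+1)) (maxi+1)
      rw [PySem.List.pyRange_one_append ((10:Int) ^ k) (min ((10:Int) ^ (k+1)) (maxi + 1))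
        (maxi + 1) (by omega) (by omega)]
      rw [List.filter_append, List.map_append]
      congr 1
      · -- emitted level = the filtered range [10^k, min(10^(k+1), maxi+1))
        rw [pvClipHi _ (maxi + 1) ((10:Int)^(k+1) - (10:Int)^k).toNat ((10:Int)^k)
          ((10:Int)^(k+1)) rfl]
        congr 1
        apply List.filter_congr
        intro x hx
        rw [PySem.List.mem_pyRange_one] at hx
        rw [pvP]
        by_cases h1 : lo ≤ x <;> by_cases h2 : x ≤ maxi
        · simp [h1, h2, show 10 * (x / 10) ≤ maxi from by omega]
        · simp [h1, h2]
        · simp [h1, h2, show 10 * (x / 10) ≤ maxi from by omega]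
        · simp [h1, h2]
      · -- the recursive call covers [min(10^(k+1), maxi+1), maxi+1) = [10^(k+1), maxi+1)
        congr 1
        by_cases hle : (10:Int) ^ (k+1) ≤ maxi + 1
        · rw [min_eq_left hle]
        · rw [min_eq_right (by omega)]
          rw [PySem.List.pyRange_one_eq_nil (le_refl (maxi + 1)),
              PySem.List.pyRange_one_eq_nil (by omega : maxi + 1 ≤ (10:Int) ^ (k+1))]
    · -- the guard fails: no number in [10^k, maxi] has all digits even
      have hnil : (PySem.List.pyRange ((10:Int) ^ k) (maxi + 1) 1).filter
          (fun n => decide (lo ≤ n) && pvQ n) = [] := by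
        rw [List.filter_eq_nil_iff]
        intro n hn
        rw [PySem.List.mem_pyRange_one] at hn
        have hq : pvQ n = false := by
          have hc : ((10:Nat) ^ k : Int) = (10:Int) ^ k := by push_cast; ring
          apply pvNotEvenLow k n.toNat (by omega) (by omega)
        simp [hq]
      rw [hnil]
      cases hpl : pvLevel maxi k with
      | nil => simp [pvLoop]
      | cons hd tl =>
        have hhd : 2 * (10:Int) ^ k ≤ hd :=
          pvLevel_lb maxi k hd (by rw [hpl]; exact List.mem_cons_self ..)
        simp only [pvLoop]
        rw [if_neg (by omega)]
        simp

theorem pvFuel_ok (maximum : Int) : maximum < (10:Int) ^ (0 + (maximum.natAbs + 1)) := by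
  have h1 : (maximum.natAbs : Int) < (10:Int) ^ (maximum.natAbs + 1) := by
    have : maximum.natAbs < 10 ^ (maximum.natAbs + 1) := by
      calc maximum.natAbs < 10 ^ maximum.natAbs := Nat.lt_pow_self (by omega)
      _ ≤ 10 ^ (maximum.natAbs + 1) := Nat.pow_le_pow_right (by omega) (by omega)
    exact_mod_cast this
  have h2 : maximum ≤ (maximum.natAbs : Int) := Int.le_natAbs
  simp only [Nat.zero_add]
  omega

-- ===== VERDICT (by name: the statement is the Claim_ definition above) =====
theorem pvQ_zero : pvQ 0 = true := by
  rw [pvQ, show (0:Int).toNat = 0 from rfl, pvEvenN, dif_pos (by omega)]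
  rfl

theorem all_even_spec : Claim_equal_all_even := by
  unfold Claim_equal_all_even Spec_all_even
  intro minimum maximum _ hpre
  have hB : all_even_alt minimum maximum =
      (if max minimum 0 ≤ 0 ∧ 0 ≤ maximum then ["0"] else [])
        ++ pvLoop (max minimum 0) maximum (maximum.natAbs + 1) (pvLevel maximum 0) := rfl
  have hloop := pvLoop_eq (max minimum 0) maximum (maximum.natAbs + 1) 0 (pvFuel_ok maximum)
  rw [pvA_eq, hB, hloop]
  rw [show ((10:Int) ^ 0) = 1 from by norm_num]
  by_cases hmm : maximum < minimum
  · -- empty range: both sides are []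
    rw [PySem.List.pyRange_one_eq_nil (by omega : maximum + 1 ≤ minimum)]
    rw [if_neg (by omega : ¬ (max minimum 0 ≤ 0 ∧ 0 ≤ maximum))]
    have hnil : (PySem.List.pyRange 1 (maximum + 1) 1).filter
        (fun n => decide (max minimum 0 ≤ n) && pvQ n) = [] := by
      rw [List.filter_eq_nil_iff]
      intro n hn
      rw [PySem.List.mem_pyRange_one] at hn
      simp [show ¬ max minimum 0 ≤ n from by omega]
    rw [hnil]
    simp
  · -- 0 ≤ minimum ≤ maximum
    have hmin : 0 ≤ minimum := by rcases hpre with h | h <;> omega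
    have hfc : (PySem.List.pyRange minimum (maximum + 1) 1).filter
          (fun i => pvAllEvenChars (PySem.Int.toChars i))
        = (PySem.List.pyRange minimum (maximum + 1) 1).filter pvQ := by
      apply List.filter_congr
      intro x hx
      rw [PySem.List.mem_pyRange_one] at hx
      exact pvAPred_eq x (by omega)
    rw [hfc]
    have hclip := pvClipLo pvQ minimum (maximum + 1) ((maximum + 1 - 1).toNat) 1 rfl
    by_cases h0 : minimum = 0
    · subst h0
      rw [if_pos (by omega)]
      rw [PySem.List.pyRange_one_cons (by omega : (0:Int) < maximum + 1)]
      rw [List.filter_cons, if_pos (by simp [pvQ_zero])]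
      rw [List.map_cons]
      rw [show PySem.Int.toStr 0 = "0" from by decide]
      rw [show max (0:Int) 0 = 0 from by omega]
      congr 1
      rw [show max (1:Int) 0 = 1 from by omega] at hclip
      rw [← hclip]
      norm_num
    · rw [if_neg (by omega)]
      rw [show max minimum 0 = minimum from by omega]
      rw [show max (1:Int) minimum = minimum from by omega] at hclip
      rw [← hclip]
      simp

@[simp]
theorem all_even_raises : Claim_raises_all_even := by
  unfold Claim_raises_all_even
  constructor
  · intro minimum maximum _ hr hp
    rcases hr with ⟨h1, h2⟩
    rcases hp with h | h <;> omega
  · refine ⟨by decide, by decide, by decide⟩
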